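-- pv_equiv track=rewrite | github.com/ViacheslavKovalchuk2010/Python_DQE | home_task_4_dictionary.py | construct_common_dict
-- ===== SOURCE A (Python) =====
-- def construct_common_dict(list_of_dicts):
--     """Constructs a dictionary with the highest values from the list of dictionaries."""
--     # Create an empty dictionary to store the highest values.
--     common_dict = {}
--     # Iterate through the list of dictionaries with index
--     for index, d in enumerate(list_of_dicts):
--         # Iterate through key-value pairs of each dictionary
--         for key, value in d.items():
--             # If the value is greater than the stored one
--             if key in common_dict and value > common_dict[key][1]:
--                 # Update the value and the index
--                 common_dict[key] = (index + 1, value)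
--             # If the key is not in the common_dict
--             elif key not in common_dict:
--                 # Store new key with index and value
--                 common_dict[key] = (index + 1, value)
--     # Return the dictionary with the highest values
--     return common_dict
-- ===== SOURCE B (Python) =====
-- def construct_common_dict(list_of_dicts):
--     """Constructs a dictionary with the highest values from the list of dictionaries."""
--     # First pass: group all (source_index, value) pairs by key, in encounter order.
--     groups = {}
--     for index, d in enumerate(list_of_dicts, 1):
--         for key, value in d.items():
--             groups.setdefault(key, []).append((index, value))
--     # Second pass: per key keep the first pair with the highest value
--     # (max returns the first maximal element, matching strictly-greater updates).
--     return {key: max(pairs, key=lambda p: p[1]) for key, pairs in groups.items()}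
-- ===== Notes on version B (the rewrite author's own statement) =====
-- stated objective: alternative
-- what changed: Instead of updating a best-so-far (index,value) per key inside the scan, B first groups all (index,value) pairs by key in one pass and then picks each key's first maximal pair with max(key=...) in a second pass.
import Mathlib
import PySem

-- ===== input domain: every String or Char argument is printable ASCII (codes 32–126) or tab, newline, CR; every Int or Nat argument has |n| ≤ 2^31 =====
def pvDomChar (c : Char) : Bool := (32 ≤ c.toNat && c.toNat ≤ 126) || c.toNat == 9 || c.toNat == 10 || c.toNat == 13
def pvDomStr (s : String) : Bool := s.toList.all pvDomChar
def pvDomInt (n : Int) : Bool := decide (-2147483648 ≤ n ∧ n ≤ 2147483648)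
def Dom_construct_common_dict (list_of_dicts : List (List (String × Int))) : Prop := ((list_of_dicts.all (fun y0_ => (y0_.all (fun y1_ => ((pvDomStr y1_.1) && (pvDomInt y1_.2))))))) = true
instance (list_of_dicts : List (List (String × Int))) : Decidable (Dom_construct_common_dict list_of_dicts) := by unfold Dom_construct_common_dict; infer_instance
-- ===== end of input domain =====

-- B replaces A's in-scan best-so-far update per key by a two-pass decomposition:
-- group all (index, value) pairs by key, then take each key's first maximal pair.

-- ===== PORT A =====
def construct_common_dict (list_of_dicts : List (List (String × Int))) : List (String × Int × Int) :=
  ((PySem.List.enumerate list_of_dicts 0).foldl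
    (fun cd p =>
      p.2.foldl (fun cd kv =>
        if cd.contains kv.1 && decide ((cd.getD kv.1 (0, 0)).2 < kv.2) then
          cd.insert kv.1 (p.1 + 1, kv.2)
        else if !cd.contains kv.1 then
          cd.insert kv.1 (p.1 + 1, kv.2)
        else cd) cd)
    PySem.Dict.empty).items

-- ===== PORT B =====
-- max(pairs, key=lambda p: p[1]) on a (necessarily nonempty) group; the (0, 0)
-- fallback is the unreachable none case of PySem.List.max?.
def pvPickMax (ps : List (Int × Int)) : Int × Int :=
  match PySem.List.max? ps (fun p => p.2) with
  | some m => m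
  | none => (0, 0)

def construct_common_dict_alt (list_of_dicts : List (List (String × Int))) : List (String × Int × Int) :=
  let groups : PySem.Dict String (List (Int × Int)) :=
    (PySem.List.enumerate list_of_dicts 1).foldl
      (fun g p =>
        p.2.foldl (fun g kv => g.modify kv.1 [] (· ++ [(p.1, kv.2)])) g)
      PySem.Dict.empty
  groups.items.map (fun q => (q.1, pvPickMax q.2))

-- ===== PRECONDITION & SPEC =====
def Spec_construct_common_dict (list_of_dicts : List (List (String × Int))) (out : List (String × Int × Int)) : Prop := out = construct_common_dict_alt list_of_dicts
instance (list_of_dicts : List (List (String × Int))) (out : List (String × Int × Int)) : Decidable (Spec_construct_common_dict list_of_dicts out) := by unfold Spec_construct_common_dict; infer_instance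

-- ===== CLAIM (what is proved, stated in full; the proofs are below) =====
def Claim_equal_construct_common_dict : Prop := ∀ (list_of_dicts : List (List (String × Int))), Dom_construct_common_dict list_of_dicts → Spec_construct_common_dict list_of_dicts (construct_common_dict list_of_dicts)

-- ===== LEMMAS AND PROOFS =====

-- A's single step on the best-so-far dict, over one flattened (key, index, value) triple.
def pvStepA (cd : PySem.Dict String (Int × Int)) (t : String × Int × Int) : PySem.Dict String (Int × Int) :=
  if cd.contains t.1 && decide ((cd.getD t.1 (0, 0)).2 < t.2.2) then cd.insert t.1 t.2
  else if !cd.contains t.1 then cd.insert t.1 t.2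
  else cd

-- B's single grouping step on the same triple.
def pvStepB (g : PySem.Dict String (List (Int × Int))) (t : String × Int × Int) : PySem.Dict String (List (Int × Int)) :=
  g.modify t.1 [] (· ++ [t.2])

lemma pvPickMax_append (ps : List (Int × Int)) (x : Int × Int) (h : ps ≠ []) :
    pvPickMax (ps ++ [x]) = if (pvPickMax ps).2 < x.2 then x else pvPickMax ps := by
  obtain ⟨m, hm⟩ : ∃ m, PySem.List.max? ps (fun p => p.2) = some m := by
    cases hmm : PySem.List.max? ps (fun p => p.2) with
    | none => exact absurd ((PySem.List.max?_eq_none_iff _ _).1 hmm) h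
    | some m => exact ⟨m, rfl⟩
  simp [pvPickMax, PySem.List.max?, List.foldl_append] at *
  rw [hm]
  by_cases hc : m.2 < x.2 <;> simp [hc]

-- the enumerate-shift: enumerating from s+1 is enumerating from s with indices bumped
lemma pvEnumerate_shift {α : Type} (xs : List α) (s : Int) :
    PySem.List.enumerate xs (s + 1) = (PySem.List.enumerate xs s).map (fun p => (p.1 + 1, p.2)) := by
  induction xs generalizing s with
  | nil => simp [PySem.List.enumerate_nil]
  | cons x t ih => simp [PySem.List.enumerate_cons, ih]

-- a nested fold over an enumerated list of dicts is a fold over the flattened triples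
lemma pvFoldl_flat {δ : Type} (l : List (Int × List (String × Int)))
    (f : δ → String × Int × Int → δ) (off : Int) (init : δ) :
    l.foldl (fun acc p => p.2.foldl (fun acc kv => f acc (kv.1, p.1 + off, kv.2)) acc) init
      = (l.flatMap (fun p => p.2.map (fun kv => (kv.1, p.1 + off, kv.2)))).foldl f init := by
  induction l generalizing init with
  | nil => rfl
  | cons p t ih => simp [List.foldl_append, List.foldl_map, ih]

lemma pvGetRel (g : PySem.Dict String (List (Int × Int))) (cd : PySem.Dict String (Int × Int))
    (hrel : cd.items = g.items.map (fun p => (p.1, pvPickMax p.2))) (k : String) :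
    cd.get? k = (g.get? k).map pvPickMax := by
  simp [PySem.Dict.get?, hrel, List.find?_map, Function.comp_def]

lemma pvContainsRel (g : PySem.Dict String (List (Int × Int))) (cd : PySem.Dict String (Int × Int))
    (hrel : cd.items = g.items.map (fun p => (p.1, pvPickMax p.2))) (k : String) :
    cd.contains k = g.contains k := by
  simp [PySem.Dict.contains, hrel, List.any_map, Function.comp_def]

lemma pvStep (g : PySem.Dict String (List (Int × Int))) (cd : PySem.Dict String (Int × Int))
    (hnd : g.keys.Nodup)
    (hne : ∀ p ∈ g.items, p.2 ≠ [])
    (hrel : cd.items = g.items.map (fun p => (p.1, pvPickMax p.2)))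
    (t : String × Int × Int) :
    (pvStepA cd t).items = (pvStepB g t).items.map (fun p => (p.1, pvPickMax p.2)) := by
  obtain ⟨k, i, v⟩ := t
  have hcon := pvContainsRel g cd hrel k
  by_cases hc : g.contains k = true
  · -- key already grouped
    obtain ⟨ps, hps⟩ : ∃ ps, g.get? k = some ps := by
      have := PySem.Dict.contains_eq_isSome_get? (d := g) (k := k)
      rw [hc] at this
      exact Option.isSome_iff_exists.1 this.symm
    have hpsne : ps ≠ [] := hne _ (PySem.Dict.mem_items_of_get?_eq_some g hps)
    have hgd : g.getD k [] = ps := PySem.Dict.getD_of_get?_eq_some g [] hps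
    have hcd : cd.getD k (0, 0) = pvPickMax ps := by
      simp [PySem.Dict.getD_eq_get?_getD, pvGetRel g cd hrel k, hps]
    have hmem : ∀ p ∈ g.items, p.1 = k → p = (k, ps) := by
      intro p hp hpk
      have := PySem.Dict.get?_of_mem_items g (k := p.1) (v := p.2) (by simpa using hp) hnd
      rw [hpk, hps] at this
      obtain ⟨p1, p2⟩ := p
      simp_all
    have happ := pvPickMax_append ps (i, v) hpsne
    unfold pvStepA pvStepB PySem.Dict.modify
    dsimp only
    rw [hgd]
    by_cases hv : (pvPickMax ps).2 < v
    · simp only [hcon, hc, hcd, hv, decide_true, Bool.and_true, if_true]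
      rw [PySem.Dict.items_insert_of_contains _ _ (by rw [hcon]; exact hc),
          PySem.Dict.items_insert_of_contains _ _ hc, hrel, List.map_map, List.map_map]
      refine List.map_congr_left (fun p hp => ?_)
      by_cases hpk : p.1 = k
      · have := hmem p hp hpk
        subst this
        simp [happ, hv]
      · simp [hpk, Function.comp]
    · simp only [hcon, hc, hcd, hv, decide_false, Bool.and_false, if_false,
        Bool.not_true, Bool.false_eq_true]
      rw [PySem.Dict.items_insert_of_contains _ _ hc, hrel, List.map_map]
      refine List.map_congr_left (fun p hp => ?_)
      by_cases hpk : p.1 = k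
      · have := hmem p hp hpk
        subst this
        simp [happ, hv]
      · simp [hpk, Function.comp]
  · -- fresh key: both append
    have hc' : g.contains k = false := by simpa using hc
    have hcdc : cd.contains k = false := by rw [hcon]; exact hc'
    unfold pvStepA pvStepB PySem.Dict.modify
    dsimp only
    rw [PySem.Dict.getD_of_not_contains g [] hc']
    simp only [hcdc, Bool.false_and, Bool.not_false, if_true]
    rw [if_neg (by simp), PySem.Dict.items_insert_of_not_contains _ _ hcdc,
        PySem.Dict.items_insert_of_not_contains _ _ hc', hrel]
    simp [pvPickMax, PySem.List.max?]

lemma pvStepB_nodup (g : PySem.Dict String (List (Int × Int))) (hnd : g.keys.Nodup)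
    (t : String × Int × Int) : (pvStepB g t).keys.Nodup := by
  unfold pvStepB PySem.Dict.modify
  exact PySem.Dict.nodup_keys_insert _ _ _ hnd

lemma pvStepB_ne (g : PySem.Dict String (List (Int × Int)))
    (hne : ∀ p ∈ g.items, p.2 ≠ []) (t : String × Int × Int) :
    ∀ p ∈ (pvStepB g t).items, p.2 ≠ [] := by
  intro p hp
  unfold pvStepB PySem.Dict.modify at hp
  rw [PySem.Dict.items_insert] at hp
  by_cases hc : g.contains t.1 = true
  · rw [if_pos hc] at hp
    obtain ⟨q, hq, rfl⟩ := List.mem_map.1 hp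
    by_cases hqk : q.1 == t.1
    · simp [hqk]
    · simpa [hqk] using hne q hq
  · rw [if_neg hc] at hp
    rcases List.mem_append.1 hp with h | h
    · exact hne p h
    · simp only [List.mem_singleton] at h
      subst h
      simp

lemma pvMain (flat : List (String × Int × Int))
    (g : PySem.Dict String (List (Int × Int))) (cd : PySem.Dict String (Int × Int))
    (hnd : g.keys.Nodup)
    (hne : ∀ p ∈ g.items, p.2 ≠ [])
    (hrel : cd.items = g.items.map (fun p => (p.1, pvPickMax p.2))) :
    (flat.foldl pvStepA cd).items
      = ((flat.foldl pvStepB g).items).map (fun p => (p.1, pvPickMax p.2)) := by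
  induction flat generalizing g cd with
  | nil => simpa using hrel
  | cons t rest ih =>
    exact ih (pvStepB g t) (pvStepA cd t) (pvStepB_nodup g hnd t)
      (pvStepB_ne g hne t) (pvStep g cd hnd hne hrel t)

-- ===== VERDICT (by name: the statement is the Claim_ definition above) =====
theorem construct_common_dict_spec : Claim_equal_construct_common_dict := by
  intro l _
  show construct_common_dict l = construct_common_dict_alt l
  show ((PySem.List.enumerate l 0).foldl
      (fun cd p => p.2.foldl (fun cd kv => pvStepA cd (kv.1, p.1 + 1, kv.2)) cd)
      PySem.Dict.empty).items
    = (((PySem.List.enumerate l 1).foldl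
      (fun g p => p.2.foldl (fun g kv => pvStepB g (kv.1, p.1, kv.2)) g)
      PySem.Dict.empty).items).map (fun q => (q.1, pvPickMax q.2))
  have hsh := pvEnumerate_shift l 0
  norm_num at hsh
  rw [hsh, List.foldl_map]
  rw [pvFoldl_flat _ pvStepA 1, pvFoldl_flat _ pvStepB 1]
  exact pvMain _ _ _ (by simp [PySem.Dict.keys_empty]) (by simp [PySem.Dict.empty]) rfl
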